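-- pv_equiv track=rewrite | github.com/VRoam10/T-AIA-911-REN_4 | tests/data/generate_eval_datasets.py | label_for_template
-- ===== SOURCE A (Python) =====
-- from typing import Iterable, List, Tuple
--
-- TEMPLATES = [
--     ("T01", "Je veux aller de {DEP} a {ARR}", "POSITIVE", "EASY"),
--     ("T02", "Trajet de {DEP} a {ARR}", "POSITIVE", "EASY"),
--     ("T03", "Comment aller de {DEP} a {ARR} ?", "POSITIVE", "EASY"),
--     ("T04", "Donne moi l itineraire de {DEP} a {ARR}", "POSITIVE", "MEDIUM"),
--     ("T05", "Je pars de {DEP} pour aller a {ARR}", "POSITIVE", "MEDIUM"),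
--     ("T06", "De {DEP} a {ARR}", "POSITIVE", "EASY"),
--     ("T07", "Train de {DEP} vers {ARR}", "POSITIVE", "MEDIUM"),
--     ("T08", "Itineraire entre {DEP} et {ARR}", "POSITIVE", "MEDIUM"),
--     ("N01", "Quel temps fait il a {ARR} ?", "NEGATIVE", "EASY"),
--     ("N02", "Meteo a {ARR} aujourd hui", "NEGATIVE", "EASY"),
--     ("N03", "Je cherche un train pour {ARR}", "NEGATIVE", "MEDIUM"),
--     ("N04", "Je vais voir un ami a {ARR}", "NEGATIVE", "MEDIUM"),
--     ("N05", "Je voyage demain", "NEGATIVE", "EASY"),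
--     ("F01", "I need to go {ARR} from {DEP}", "NEGATIVE", "EASY"),
--     ("F02", "How do I get from {DEP} to {ARR}?", "NEGATIVE", "EASY"),
--     ("A01", "Je veux aller de {DEP} a {ARR} a {DEP}", "AMBIGUOUS", "HARD"),
--     ("A02", "{DEP} {ARR}", "AMBIGUOUS", "MEDIUM"),
--     ("A03", "Je pars de {DEP}", "AMBIGUOUS", "EASY"),
--     ("A04", "Je vais a {ARR}", "AMBIGUOUS", "EASY"),
-- ]
--
-- def label_for_template(template_id: str) -> Tuple[str, str]:
--     for tid, _tpl, case_type, _diff in TEMPLATES: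
--         if tid == template_id:
--             if tid.startswith("F"):
--                 return "NOT_FRENCH", "en"
--             if case_type == "POSITIVE":
--                 return "TRIP", "fr"
--             if case_type == "NEGATIVE":
--                 return "NOT_TRIP", "fr"
--             return "NOT_TRIP", "fr"
--     return "UNKNOWN", "unknown"
-- ===== SOURCE B (Python) =====
-- # Every valid template id is a letter followed by "0" and a digit; classify by
-- # prefix letter and validate the digit against a per-letter digit string,
-- # instead of scanning the TEMPLATES table.
-- _DIGITS = {"T": "12345678", "N": "12345", "F": "12", "A": "1234"}
--
-- def label_for_template(template_id):
--     if len(template_id) == 3 and template_id[1] == "0" \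
--             and template_id[2] in _DIGITS.get(template_id[0], ""):
--         prefix = template_id[0]
--         if prefix == "F":
--             return "NOT_FRENCH", "en"
--         if prefix == "T":
--             return "TRIP", "fr"
--         return "NOT_TRIP", "fr"
--     return "UNKNOWN", "unknown"
-- ===== Notes on version B (the rewrite author's own statement) =====
-- stated objective: alternative
-- what changed: B drops the TEMPLATES table entirely: it validates the id by its shape (letter, '0', digit drawn from a per-letter digit string) and classifies it by its prefix letter, instead of scanning the table and reading the matching row's case_type field.
import Mathlib
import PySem

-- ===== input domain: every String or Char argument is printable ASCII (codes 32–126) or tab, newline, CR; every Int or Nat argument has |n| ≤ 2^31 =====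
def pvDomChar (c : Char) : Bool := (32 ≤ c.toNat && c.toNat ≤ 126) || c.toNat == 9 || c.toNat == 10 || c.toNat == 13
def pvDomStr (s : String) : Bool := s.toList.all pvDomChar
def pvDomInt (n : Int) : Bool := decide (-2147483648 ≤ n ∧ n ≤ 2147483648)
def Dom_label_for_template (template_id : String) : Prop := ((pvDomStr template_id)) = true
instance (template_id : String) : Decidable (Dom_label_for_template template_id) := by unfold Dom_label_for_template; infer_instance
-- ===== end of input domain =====

-- B drops the template table: it validates the id by its character shape (letter, '0', digit
-- from a per-letter digit string) and classifies it by its prefix letter (objective: alternative).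

-- ===== PORT A =====
def pvTemplates : List (String × String × String × String) := [
  ("T01", "Je veux aller de {DEP} a {ARR}", "POSITIVE", "EASY"),
  ("T02", "Trajet de {DEP} a {ARR}", "POSITIVE", "EASY"),
  ("T03", "Comment aller de {DEP} a {ARR} ?", "POSITIVE", "EASY"),
  ("T04", "Donne moi l itineraire de {DEP} a {ARR}", "POSITIVE", "MEDIUM"),
  ("T05", "Je pars de {DEP} pour aller a {ARR}", "POSITIVE", "MEDIUM"),
  ("T06", "De {DEP} a {ARR}", "POSITIVE", "EASY"),
  ("T07", "Train de {DEP} vers {ARR}", "POSITIVE", "MEDIUM"),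
  ("T08", "Itineraire entre {DEP} et {ARR}", "POSITIVE", "MEDIUM"),
  ("N01", "Quel temps fait il a {ARR} ?", "NEGATIVE", "EASY"),
  ("N02", "Meteo a {ARR} aujourd hui", "NEGATIVE", "EASY"),
  ("N03", "Je cherche un train pour {ARR}", "NEGATIVE", "MEDIUM"),
  ("N04", "Je vais voir un ami a {ARR}", "NEGATIVE", "MEDIUM"),
  ("N05", "Je voyage demain", "NEGATIVE", "EASY"),
  ("F01", "I need to go {ARR} from {DEP}", "NEGATIVE", "EASY"),
  ("F02", "How do I get from {DEP} to {ARR}?", "NEGATIVE", "EASY"),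
  ("A01", "Je veux aller de {DEP} a {ARR} a {DEP}", "AMBIGUOUS", "HARD"),
  ("A02", "{DEP} {ARR}", "AMBIGUOUS", "MEDIUM"),
  ("A03", "Je pars de {DEP}", "AMBIGUOUS", "EASY"),
  ("A04", "Je vais a {ARR}", "AMBIGUOUS", "EASY")
]

def pvLabelLoop : List (String × String × String × String) → String → String × String
  | [], _ => ("UNKNOWN", "unknown")
  | (tid, _tpl, case_type, _diff) :: rest, template_id =>
    if tid == template_id then
      if PySem.Str.startswith tid "F" then ("NOT_FRENCH", "en")
      else if case_type == "POSITIVE" then ("TRIP", "fr")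
      else if case_type == "NEGATIVE" then ("NOT_TRIP", "fr")
      else ("NOT_TRIP", "fr")
    else pvLabelLoop rest template_id

def label_for_template (template_id : String) : String × String :=
  pvLabelLoop pvTemplates template_id

-- ===== PORT B =====
def pvDigits : PySem.Dict Char String :=
  PySem.Dict.mk [('T', "12345678"), ('N', "12345"), ('F', "12"), ('A', "1234")]

-- len(s) == 3, s[1] == "0", s[2] in _DIGITS.get(s[0], "") ported by matching the char list;
-- 'c in str' is membership of c in the string's char list (exact on this ASCII data).
def label_for_template_alt (template_id : String) : String × String :=
  match template_id.toList with
  | [p, z, d] =>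
    if z = '0' ∧ d ∈ (PySem.Dict.getD pvDigits p "").toList then
      if p = 'F' then ("NOT_FRENCH", "en")
      else if p = 'T' then ("TRIP", "fr")
      else ("NOT_TRIP", "fr")
    else ("UNKNOWN", "unknown")
  | _ => ("UNKNOWN", "unknown")

-- ===== PRECONDITION & SPEC =====
def Spec_label_for_template (template_id : String) (out : String × String) : Prop := out = label_for_template_alt template_id
instance (template_id : String) (out : String × String) : Decidable (Spec_label_for_template template_id out) := by unfold Spec_label_for_template; infer_instance

-- ===== CLAIM =====
def Claim_equal_label_for_template : Prop := ∀ (template_id : String), Dom_label_for_template template_id → Spec_label_for_template template_id (label_for_template template_id)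

-- ===== LEMMAS AND PROOFS =====

-- If s is none of the 19 listed ids, B returns UNKNOWN.
theorem alt_unknown (s : String)
    (h : ∀ t ∈ ["T01","T02","T03","T04","T05","T06","T07","T08","N01","N02","N03","N04","N05","F01","F02","A01","A02","A03","A04"], s ≠ t) :
    label_for_template_alt s = ("UNKNOWN", "unknown") := by
  unfold label_for_template_alt
  rcases hl : s.toList with _ | ⟨p, _ | ⟨z, _ | ⟨d, _ | _⟩⟩⟩ <;> try rfl
  dsimp only
  by_cases hc : z = '0' ∧ d ∈ (PySem.Dict.getD pvDigits p "").toList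
  case neg => rw [if_neg hc]
  case pos =>
    exfalso
    obtain ⟨rfl, hd⟩ := hc
    by_cases hT: p = 'T'
    · subst hT
      rw [show (PySem.Dict.getD pvDigits 'T' "").toList = ['1','2','3','4','5','6','7','8'] from by decide] at hd
      simp only [List.mem_cons, List.not_mem_nil, or_false] at hd
      rcases hd with rfl|rfl|rfl|rfl|rfl|rfl|rfl|rfl
      · exact h "T01" (by simp) (String.toList_inj.mp (hl.trans (by decide)))
      · exact h "T02" (by simp) (String.toList_inj.mp (hl.trans (by decide)))
      · exact h "T03" (by simp) (String.toList_inj.mp (hl.trans (by decide)))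
      · exact h "T04" (by simp) (String.toList_inj.mp (hl.trans (by decide)))
      · exact h "T05" (by simp) (String.toList_inj.mp (hl.trans (by decide)))
      · exact h "T06" (by simp) (String.toList_inj.mp (hl.trans (by decide)))
      · exact h "T07" (by simp) (String.toList_inj.mp (hl.trans (by decide)))
      · exact h "T08" (by simp) (String.toList_inj.mp (hl.trans (by decide)))
    by_cases hN: p = 'N'
    · subst hN
      rw [show (PySem.Dict.getD pvDigits 'N' "").toList = ['1','2','3','4','5'] from by decide] at hd
      simp only [List.mem_cons, List.not_mem_nil, or_false] at hd
      rcases hd with rfl|rfl|rfl|rfl|rfl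
      · exact h "N01" (by simp) (String.toList_inj.mp (hl.trans (by decide)))
      · exact h "N02" (by simp) (String.toList_inj.mp (hl.trans (by decide)))
      · exact h "N03" (by simp) (String.toList_inj.mp (hl.trans (by decide)))
      · exact h "N04" (by simp) (String.toList_inj.mp (hl.trans (by decide)))
      · exact h "N05" (by simp) (String.toList_inj.mp (hl.trans (by decide)))
    by_cases hF: p = 'F'
    · subst hF
      rw [show (PySem.Dict.getD pvDigits 'F' "").toList = ['1','2'] from by decide] at hd
      simp only [List.mem_cons, List.not_mem_nil, or_false] at hd
      rcases hd with rfl|rfl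
      · exact h "F01" (by simp) (String.toList_inj.mp (hl.trans (by decide)))
      · exact h "F02" (by simp) (String.toList_inj.mp (hl.trans (by decide)))
    by_cases hA: p = 'A'
    · subst hA
      rw [show (PySem.Dict.getD pvDigits 'A' "").toList = ['1','2','3','4'] from by decide] at hd
      simp only [List.mem_cons, List.not_mem_nil, or_false] at hd
      rcases hd with rfl|rfl|rfl|rfl
      · exact h "A01" (by simp) (String.toList_inj.mp (hl.trans (by decide)))
      · exact h "A02" (by simp) (String.toList_inj.mp (hl.trans (by decide)))
      · exact h "A03" (by simp) (String.toList_inj.mp (hl.trans (by decide)))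
      · exact h "A04" (by simp) (String.toList_inj.mp (hl.trans (by decide)))
    · rw [show PySem.Dict.getD pvDigits p "" = "" from by
        simp [pvDigits, PySem.Dict.getD, PySem.Dict.get?,
              Ne.symm hT, Ne.symm hN, Ne.symm hF, Ne.symm hA]] at hd
      simp at hd

-- If s is none of the 19 listed ids, A returns UNKNOWN.
theorem a_unknown (s : String)
    (h : ∀ t ∈ ["T01","T02","T03","T04","T05","T06","T07","T08","N01","N02","N03","N04","N05","F01","F02","A01","A02","A03","A04"], s ≠ t) :
    label_for_template s = ("UNKNOWN", "unknown") := by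
  simp only [List.mem_cons, forall_eq_or_imp] at h
  obtain ⟨h0,h1,h2,h3,h4,h5,h6,h7,h8,h9,h10,h11,h12,h13,h14,h15,h16,h17,h18,-⟩ := h
  simp [label_for_template, pvLabelLoop, pvTemplates,
        Ne.symm h0, Ne.symm h1, Ne.symm h2, Ne.symm h3, Ne.symm h4, Ne.symm h5,
        Ne.symm h6, Ne.symm h7, Ne.symm h8, Ne.symm h9, Ne.symm h10, Ne.symm h11,
        Ne.symm h12, Ne.symm h13, Ne.symm h14, Ne.symm h15, Ne.symm h16,
        Ne.symm h17, Ne.symm h18]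

-- ===== VERDICT =====
theorem label_for_template_spec : Claim_equal_label_for_template := by
  intro s _
  unfold Spec_label_for_template
  by_cases hm : s ∈ (["T01","T02","T03","T04","T05","T06","T07","T08","N01","N02","N03","N04","N05","F01","F02","A01","A02","A03","A04"] : List String)
  · fin_cases hm <;> decide
  · rw [a_unknown s (fun t ht he => hm (he ▸ ht)),
        alt_unknown s (fun t ht he => hm (he ▸ ht))]
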